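-- pv_equiv track=rewrite | github.com/DianaNeumann/ege-suka | 17-задание-рофлит/aaa.py | del3
-- ===== SOURCE A (Python) =====
-- def isprime(n):
--     d = 2
--     while d*d <= n:
--         if n % d == 0:
--             return 0
--
--         d += 1
--     return 1
--
-- def del3(n):
--     k = 0
--     d = 2
--     while d*d < n:
--         if n % d == 0:
--             if isprime(d) == 1:
--                 k += 1
--
--         d+=1
--
--     if k == 3:
--         return 1
--     else:
--         return 0
-- ===== SOURCE B (Python) =====
-- def del3(n):
--     # Single sieve-like pass with a shrinking remainder: once all copies of a
--     # found divisor are stripped from m, every later divisor of m is automatically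
--     # prime, so no primality test is needed.
--     k = 0
--     m = n
--     d = 2
--     while d * d < n:
--         if m % d == 0:
--             k += 1
--             while m % d == 0:
--                 m //= d
--         d += 1
--     return 1 if k == 3 else 0
-- ===== Notes on version B (the rewrite author's own statement) =====
-- stated objective: alternative
-- what changed: Replaced the nested trial-division primality test of each divisor by a shrinking-remainder factorization pass: dividing all copies of each found divisor out of m makes every later divisor of m automatically prime, so the isprime helper disappears.
import Mathlib
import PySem

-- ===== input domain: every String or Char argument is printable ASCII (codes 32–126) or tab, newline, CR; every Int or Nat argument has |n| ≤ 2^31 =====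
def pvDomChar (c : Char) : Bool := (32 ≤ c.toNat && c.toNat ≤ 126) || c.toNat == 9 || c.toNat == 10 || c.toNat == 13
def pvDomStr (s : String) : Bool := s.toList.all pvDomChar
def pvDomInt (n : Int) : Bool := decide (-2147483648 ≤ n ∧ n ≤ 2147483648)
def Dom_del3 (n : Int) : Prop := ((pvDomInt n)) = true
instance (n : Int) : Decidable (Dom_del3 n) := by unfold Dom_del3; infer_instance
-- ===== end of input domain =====

-- B replaces A's per-divisor primality scan by a shrinking-remainder factorization pass (alternative algorithm, same cost).

-- ===== PORT A =====

-- while d*d <= n: if n % d == 0: return 0; d += 1 — return 1 after the loop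
def isprimeLoop (n d : Int) : Int :=
  if _h : d * d ≤ n then
    if PySem.Int.mod n d = 0 then 0 else isprimeLoop n (d + 1)
  else 1
termination_by (n + 2 - d).toNat
decreasing_by
  have hdn : d ≤ n := by rcases Int.lt_or_le d 1 with h | h <;> nlinarith
  omega

def isprime (n : Int) : Int := isprimeLoop n 2

-- while d*d < n: if n % d == 0 and isprime(d) == 1: k += 1; d += 1 — return k
def del3LoopA (n k d : Int) : Int :=
  if _h : d * d < n then
    if PySem.Int.mod n d = 0 then
      if isprime d = 1 then del3LoopA n (k + 1) (d + 1)
      else del3LoopA n k (d + 1)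
    else del3LoopA n k (d + 1)
  else k
termination_by (n - d).toNat
decreasing_by all_goals
  have hdn : d < n := by rcases Int.lt_or_le d 1 with h | h <;> nlinarith
  omega

def del3 (n : Int) : Int :=
  let k := del3LoopA n 0 2
  if k = 3 then 1 else 0

-- ===== PORT B =====

-- inner 'while m % d == 0: m //= d'; the guards m ≠ 0 and 2 ≤ d only make the
-- same computation total (in every reachable call 0 < m and 2 ≤ d hold)
def stripB (m d : Int) : Int :=
  if _h : m ≠ 0 ∧ 2 ≤ d ∧ PySem.Int.mod m d = 0 then
    stripB (PySem.Int.floordiv m d) d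
  else m
termination_by m.natAbs
decreasing_by
  obtain ⟨hm, hd, hmod⟩ := _h
  have hdvd : d ∣ m := (PySem.Int.mod_eq_zero_iff_dvd m d).mp hmod
  obtain ⟨c, rfl⟩ := hdvd
  have hc : c ≠ 0 := by rintro rfl; simp at hm
  rw [PySem.Int.floordiv_eq_ediv_of_pos (by omega)]
  rw [Int.mul_ediv_cancel_left c (by omega : d ≠ 0)]
  calc c.natAbs < 2 * c.natAbs := by omega
    _ ≤ d.natAbs * c.natAbs := Nat.mul_le_mul_right _ (by omega)
    _ = (d * c).natAbs := (Int.natAbs_mul d c).symm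

-- while d*d < n: if m % d == 0: k += 1; strip d from m; d += 1 — return k
def del3LoopB (n k d m : Int) : Int :=
  if _h : d * d < n then
    if PySem.Int.mod m d = 0 then del3LoopB n (k + 1) (d + 1) (stripB m d)
    else del3LoopB n k (d + 1) m
  else k
termination_by (n - d).toNat
decreasing_by all_goals
  have hdn : d < n := by rcases Int.lt_or_le d 1 with h | h <;> nlinarith
  omega

def del3_alt (n : Int) : Int :=
  let k := del3LoopB n 0 2 n
  if k = 3 then 1 else 0

-- ===== PRECONDITION & SPEC =====
def Spec_del3 (n : Int) (out : Int) : Prop := out = del3_alt n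
instance (n : Int) (out : Int) : Decidable (Spec_del3 n out) := by unfold Spec_del3; infer_instance

-- ===== CLAIM (what is proved, stated in full; the proofs are below) =====
def Claim_equal_del3 : Prop := ∀ (n : Int), Dom_del3 n → Spec_del3 n (del3 n)

-- ===== LEMMAS AND PROOFS =====

-- "d has no divisor in [2, d)" — for 2 ≤ d this is primality
def NoSmallDvd (d : Int) : Prop := ∀ e : Int, 2 ≤ e → e < d → ¬ e ∣ d

lemma isprimeLoopAux : ∀ fuel : ℕ, ∀ n e : Int, (n + 2 - e).toNat ≤ fuel → 2 ≤ e →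
    (isprimeLoop n e = 1 ↔ ∀ f : Int, e ≤ f → f * f ≤ n → ¬ f ∣ n) := by
  intro fuel
  induction fuel with
  | zero =>
    intro n e hf he
    have hne : n ≤ e - 2 := by omega
    have hle : ¬ e * e ≤ n := by nlinarith
    rw [isprimeLoop, dif_neg hle]
    constructor
    · intro _ f hef hff hdvd
      have : e * e ≤ f * f := by nlinarith
      exact hle (le_trans this hff)
    · intro _; rfl
  | succ fuel ih =>
    intro n e hf he
    rw [isprimeLoop]
    by_cases hle : e * e ≤ n
    · rw [dif_pos hle]
      have hen : e ≤ n := by nlinarith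
      by_cases hmod : PySem.Int.mod n e = 0
      · rw [if_pos hmod]
        have hdvd : e ∣ n := (PySem.Int.mod_eq_zero_iff_dvd n e).mp hmod
        constructor
        · intro h; exact absurd h (by norm_num)
        · intro h; exact absurd hdvd (h e le_rfl hle)
      · rw [if_neg hmod]
        have hnd : ¬ e ∣ n := fun h => hmod ((PySem.Int.mod_eq_zero_iff_dvd n e).mpr h)
        rw [ih n (e + 1) (by omega) (by omega)]
        constructor
        · intro h f hef hff hdvd
          rcases eq_or_lt_of_le hef with rfl | hlt
          · exact hnd hdvd
          · exact h f (by omega) hff hdvd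
        · intro h f hef hff
          exact h f (by omega) hff
    · rw [dif_neg hle]
      constructor
      · intro _ f hef hff hdvd
        have : e * e ≤ f * f := by nlinarith
        exact hle (le_trans this hff)
      · intro _; rfl

lemma noSmallDvd_iff (d : Int) (hd : 2 ≤ d) :
    (∀ f : Int, 2 ≤ f → f * f ≤ d → ¬ f ∣ d) ↔ NoSmallDvd d := by
  constructor
  · intro h e he hlt hdvd
    obtain ⟨c, rfl⟩ := hdvd
    have hc2 : 2 ≤ c := by nlinarith
    rcases le_total e c with hec | hce
    · exact h e he (by nlinarith) ⟨c, rfl⟩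
    · exact h c hc2 (by nlinarith) ⟨e, mul_comm e c⟩
  · intro h f hf2 hff hdvd
    exact h f hf2 (by nlinarith) hdvd

lemma isprime_eq_one_iff (d : Int) (hd : 2 ≤ d) : isprime d = 1 ↔ NoSmallDvd d := by
  rw [isprime, isprimeLoopAux ((d + 2 - 2).toNat) d 2 le_rfl le_rfl, noSmallDvd_iff d hd]

lemma prime_of_noSmallDvd (d : Int) (hd : 2 ≤ d) (h : NoSmallDvd d) : Prime d := by
  rw [Int.prime_iff_natAbs_prime, Nat.prime_def_lt]
  refine ⟨by omega, ?_⟩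
  intro m hm hdvd
  by_contra hm1
  have hm0 : m ≠ 0 := by
    rintro rfl
    have := Nat.eq_zero_of_zero_dvd hdvd
    omega
  have hdm : (m : Int) ∣ d := by
    have := Int.natCast_dvd_natCast.mpr hdvd
    rwa [Int.natAbs_of_nonneg (by omega)] at this
  exact h (m : Int) (by omega) (by omega) hdm

-- invariant: m is n with all prime factors < d fully divided out
def LoopInv (n d m : Int) : Prop :=
  0 < m ∧ m ∣ n ∧ (∀ e : Int, 2 ≤ e → e < d → ¬ e ∣ m) ∧
    ∃ D : Int, n = m * D ∧ ∀ p : Int, 2 ≤ p → NoSmallDvd p → p ∣ D → p < d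

lemma strip_specAux : ∀ fuel : ℕ, ∀ m d : Int, m.natAbs ≤ fuel → 0 < m → 2 ≤ d →
    (0 < stripB m d ∧ stripB m d ∣ m ∧ ¬ d ∣ stripB m d ∧ ∃ j : ℕ, m = stripB m d * d ^ j) := by
  intro fuel
  induction fuel with
  | zero => intro m d hf hm hd; omega
  | succ fuel ih =>
    intro m d hf hm hd
    rw [stripB]
    by_cases hmod : PySem.Int.mod m d = 0
    · rw [dif_pos ⟨by omega, hd, hmod⟩]
      have hdvd : d ∣ m := (PySem.Int.mod_eq_zero_iff_dvd m d).mp hmod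
      obtain ⟨c, rfl⟩ := hdvd
      have hc : 0 < c := by nlinarith
      have hfd : PySem.Int.floordiv (d * c) d = c := by
        rw [PySem.Int.floordiv_eq_ediv_of_pos (by omega), Int.mul_ediv_cancel_left c (by omega)]
      rw [hfd]
      have hcf : c.natAbs ≤ fuel := by
        have h1 : (d * c).natAbs = d.natAbs * c.natAbs := Int.natAbs_mul d c
        have h2 : 2 * c.natAbs ≤ d.natAbs * c.natAbs := Nat.mul_le_mul_right _ (by omega)
        omega
      obtain ⟨h1, h2, h3, j, hj⟩ := ih c d hcf hc hd
      exact ⟨h1, h2.mul_left d, h3, j + 1, by rw [pow_succ]; nlinarith [hj]⟩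
    · rw [dif_neg (by simp [hmod])]
      exact ⟨hm, dvd_refl m, fun h => hmod ((PySem.Int.mod_eq_zero_iff_dvd m d).mpr h), 0, by ring⟩

lemma strip_spec (m d : Int) (hm : 0 < m) (hd : 2 ≤ d) :
    0 < stripB m d ∧ stripB m d ∣ m ∧ ¬ d ∣ stripB m d ∧ ∃ j : ℕ, m = stripB m d * d ^ j :=
  strip_specAux m.natAbs m d le_rfl hm hd

lemma inv_step_iff (n d m : Int) (hd : 2 ≤ d) (hInv : LoopInv n d m) :
    d ∣ m ↔ (d ∣ n ∧ NoSmallDvd d) := by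
  obtain ⟨hm, hmn, hsmall, D, hD, hDlt⟩ := hInv
  constructor
  · intro hdm
    exact ⟨dvd_trans hdm hmn, fun e he hlt hedvd => hsmall e he hlt (dvd_trans hedvd hdm)⟩
  · rintro ⟨hdn, hNS⟩
    have hp : Prime d := prime_of_noSmallDvd d hd hNS
    rw [hD] at hdn
    rcases hp.dvd_mul.mp hdn with h | h
    · exact h
    · exact absurd (hDlt d hd hNS h) (lt_irrefl d)

lemma inv_step_skip (n d m : Int) (hd : 2 ≤ d) (hInv : LoopInv n d m) (hndvd : ¬ d ∣ m) :
    LoopInv n (d + 1) m := by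
  obtain ⟨hm, hmn, hsmall, D, hD, hDlt⟩ := hInv
  refine ⟨hm, hmn, ?_, D, hD, fun p hp hNS hpd => by have := hDlt p hp hNS hpd; omega⟩
  intro e he hlt hedvd
  rcases eq_or_lt_of_le (show e ≤ d by omega) with rfl | hlt'
  · exact hndvd hedvd
  · exact hsmall e he hlt' hedvd

lemma inv_step_strip (n d m : Int) (hd : 2 ≤ d) (hInv : LoopInv n d m) (hdvd : d ∣ m) :
    LoopInv n (d + 1) (stripB m d) := by
  obtain ⟨hm, hmn, hsmall, D, hD, hDlt⟩ := hInv
  have hNSd : NoSmallDvd d := fun e he hlt hed => hsmall e he hlt (dvd_trans hed hdvd)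
  obtain ⟨h1, h2, h3, j, hj⟩ := strip_spec m d hm hd
  refine ⟨h1, dvd_trans h2 hmn, ?_, d ^ j * D, ?_, ?_⟩
  · intro e he hlt hedvd
    rcases eq_or_lt_of_le (show e ≤ d by omega) with rfl | hlt'
    · exact h3 hedvd
    · exact hsmall e he hlt' (dvd_trans hedvd h2)
  · calc n = m * D := hD
      _ = (stripB m d * d ^ j) * D := by rw [← hj]
      _ = stripB m d * (d ^ j * D) := by ring
  · intro p hp hNSp hpd
    have hprime : Prime p := prime_of_noSmallDvd p hp hNSp
    rcases hprime.dvd_mul.mp hpd with h | h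
    · have hpd' : p ∣ d := hprime.dvd_of_dvd_pow h
      have hnlt : ¬ p < d := fun hlt => hNSd p hp hlt hpd'
      have hle : p ≤ d := Int.le_of_dvd (by omega) hpd'
      omega
    · have := hDlt p hp hNSp h; omega

lemma loops_eq (n : Int) : ∀ fuel : ℕ, ∀ k d m : Int, (n - d).toNat ≤ fuel → 2 ≤ d →
    LoopInv n d m → del3LoopA n k d = del3LoopB n k d m := by
  intro fuel
  induction fuel with
  | zero =>
    intro k d m hf hd _
    have hnd : n ≤ d := by omega
    have hnlt : ¬ d * d < n := by nlinarith
    rw [del3LoopA, del3LoopB, dif_neg hnlt, dif_neg hnlt]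
  | succ fuel ih =>
    intro k d m hf hd hInv
    rw [del3LoopA, del3LoopB]
    by_cases hlt : d * d < n
    · rw [dif_pos hlt, dif_pos hlt]
      have hdn : d < n := by nlinarith
      have hiff := inv_step_iff n d m hd hInv
      by_cases hmod : PySem.Int.mod m d = 0
      · have hdm : d ∣ m := (PySem.Int.mod_eq_zero_iff_dvd m d).mp hmod
        obtain ⟨hdn', hNS⟩ := hiff.mp hdm
        rw [if_pos hmod, if_pos ((PySem.Int.mod_eq_zero_iff_dvd n d).mpr hdn'),
          if_pos ((isprime_eq_one_iff d hd).mpr hNS)]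
        exact ih (k + 1) (d + 1) (stripB m d) (by omega) (by omega)
          (inv_step_strip n d m hd hInv hdm)
      · rw [if_neg hmod]
        have hdm : ¬ d ∣ m := fun h => hmod ((PySem.Int.mod_eq_zero_iff_dvd m d).mpr h)
        have hrec := ih k (d + 1) m (by omega) (by omega) (inv_step_skip n d m hd hInv hdm)
        by_cases hndm : PySem.Int.mod n d = 0
        · rw [if_pos hndm]
          have hdn' : d ∣ n := (PySem.Int.mod_eq_zero_iff_dvd n d).mp hndm
          have hnp : isprime d ≠ 1 := fun h1 =>
            hdm (hiff.mpr ⟨hdn', (isprime_eq_one_iff d hd).mp h1⟩)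
          rw [if_neg hnp]
          exact hrec
        · rw [if_neg hndm]
          exact hrec
    · rw [dif_neg hlt, dif_neg hlt]

-- ===== VERDICT (by name: the statement is the Claim_ definition above) =====
theorem del3_spec : Claim_equal_del3 := by
  intro n _ 
  unfold Spec_del3 del3 del3_alt
  by_cases h4 : 2 * 2 < n
  · have : del3LoopA n 0 2 = del3LoopB n 0 2 n := by
      refine loops_eq n (n - 2).toNat 0 2 n le_rfl le_rfl ?_
      refine ⟨by omega, dvd_refl n, fun e he hlt => by omega, 1, by ring, ?_⟩
      intro p hp _ hpd
      have := Int.le_of_dvd (by norm_num) hpd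
      omega
    simp [this]
  · have h4' : ¬ (4:Int) < n := by omega
    rw [del3LoopA, del3LoopB]
    norm_num [h4']
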